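-- pv_equiv track=rewrite | github.com/mrabie9/elc | models/dst_resnet.py | _compute_task_splits
-- ===== SOURCE A (Python) =====
-- from typing import Callable, Dict, List, Optional, Sequence, Tuple, Union
--
-- def _compute_task_splits(num_classes: int, n_tasks: int) -> List[int]:
--     if n_tasks <= 0:
--         raise ValueError("Number of tasks must be positive.")
--     base = num_classes // n_tasks
--     remainder = num_classes % n_tasks
--     splits = [base] * n_tasks
--     for idx in range(remainder):
--         splits[-(idx + 1)] += 1  # favour later tasks when classes do not divide evenly
--     return splits
-- ===== SOURCE B (Python) =====
-- from typing import List
--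
-- def _compute_task_splits(num_classes: int, n_tasks: int) -> List[int]:
--     if n_tasks <= 0:
--         raise ValueError("Number of tasks must be positive.")
--     splits: List[int] = []
--     remaining = num_classes
--     for tasks_left in range(n_tasks, 0, -1):
--         head = remaining // tasks_left  # greedy: give the next task a fair share of what is left
--         splits.append(head)
--         remaining -= head
--     return splits
-- ===== Notes on version B (the rewrite author's own statement) =====
-- stated objective: alternative
-- what changed: Replaces compute-base-and-remainder-then-mutate-the-tail with a greedy sequential allocation: one pass that gives each task floor(remaining/tasks_left) classes and subtracts it from the remaining pool; no remainder is computed and no list entry is ever revisited.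
import Mathlib
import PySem

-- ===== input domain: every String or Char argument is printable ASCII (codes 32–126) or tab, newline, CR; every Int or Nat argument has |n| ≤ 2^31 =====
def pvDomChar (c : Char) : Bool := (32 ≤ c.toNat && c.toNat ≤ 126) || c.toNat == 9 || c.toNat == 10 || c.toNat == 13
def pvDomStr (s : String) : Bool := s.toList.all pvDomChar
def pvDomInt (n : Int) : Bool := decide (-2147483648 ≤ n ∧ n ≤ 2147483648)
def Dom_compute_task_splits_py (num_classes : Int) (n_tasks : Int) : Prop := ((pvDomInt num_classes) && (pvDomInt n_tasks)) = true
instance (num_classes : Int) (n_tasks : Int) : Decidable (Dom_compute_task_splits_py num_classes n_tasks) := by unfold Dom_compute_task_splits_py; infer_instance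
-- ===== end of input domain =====

-- B replaces A's allocate-then-mutate tail loop with a one-pass greedy sequential
-- allocation (each task gets floor(remaining/tasks_left) of the pool); objective: alternative.


-- ===== PORT A =====
-- literal transliteration of _compute_task_splits: guard, //, %, [base]*n_tasks,
-- then the mutation loop 'for idx in range(remainder): splits[-(idx+1)] += 1'
def compute_task_splits_py (num_classes : Int) (n_tasks : Int) : List Int :=
  if n_tasks ≤ 0 then []  -- Python raises ValueError here; excluded by Pre_
  else
    let base := PySem.Int.floordiv num_classes n_tasks
    let remainder := PySem.Int.mod num_classes n_tasks
    let splits := List.replicate n_tasks.toNat base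
    (PySem.List.pyRange 0 remainder 1).foldl
      (fun splits idx =>
        PySem.List.pySetD splits (-(idx + 1)) (PySem.List.pyGetD splits (-(idx + 1)) 0 + 1))
      splits

-- ===== PORT B =====
-- literal transliteration of Source B: guard, then one pass over range(n_tasks, 0, -1)
-- with state (splits, remaining); head = remaining // tasks_left, append, subtract
def compute_task_splits_py_alt (num_classes : Int) (n_tasks : Int) : List Int :=
  if n_tasks ≤ 0 then []  -- Python raises ValueError here; excluded by Pre_
  else
    let res := (PySem.List.pyRange n_tasks 0 (-1)).foldl
      (fun st tasks_left =>
        let head := PySem.Int.floordiv st.2 tasks_left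
        (st.1 ++ [head], st.2 - head))
      (([] : List Int), num_classes)
    res.1

-- ===== PRECONDITION & SPEC =====
-- Both Pythons raise ValueError when n_tasks <= 0; Pre_ excludes exactly those inputs.
def Pre_compute_task_splits_py (_num_classes : Int) (n_tasks : Int) : Prop := 0 < n_tasks
instance (num_classes : Int) (n_tasks : Int) : Decidable (Pre_compute_task_splits_py num_classes n_tasks) := by unfold Pre_compute_task_splits_py; infer_instance

def pvWitness_compute_task_splits_py : Int × Int := (10, 3)

def Spec_compute_task_splits_py (num_classes : Int) (n_tasks : Int) (out : List Int) : Prop := out = compute_task_splits_py_alt num_classes n_tasks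
instance (num_classes : Int) (n_tasks : Int) (out : List Int) : Decidable (Spec_compute_task_splits_py num_classes n_tasks out) := by unfold Spec_compute_task_splits_py; infer_instance

-- ===== CLAIM (what is proved, stated in full; the proofs are below) =====
def Claim_equal_compute_task_splits_py : Prop := ∀ (num_classes : Int) (n_tasks : Int), Dom_compute_task_splits_py num_classes n_tasks → Pre_compute_task_splits_py num_classes n_tasks → Spec_compute_task_splits_py num_classes n_tasks (compute_task_splits_py num_classes n_tasks)

-- ===== LEMMAS AND PROOFS =====

-- one loop step on the invariant shape: bump position n-1-k (the Python index -(k+1))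
lemma pv_step (base : Int) (n k : Nat) (hk : k < n) :
    PySem.List.pySetD (List.replicate (n - k) base ++ List.replicate k (base + 1))
        (-((k : Int) + 1))
        (PySem.List.pyGetD (List.replicate (n - k) base ++ List.replicate k (base + 1))
            (-((k : Int) + 1)) 0 + 1)
      = List.replicate (n - (k + 1)) base ++ List.replicate (k + 1) (base + 1) := by
  have hlen : (List.replicate (n - k) base ++ List.replicate k (base + 1)).length = n := by
    simp; omega
  have hidx : PySem.List.pyIdx?
      (List.replicate (n - k) base ++ List.replicate k (base + 1)).length (-((k : Int) + 1))
      = some (n - (k + 1)) := by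
    rw [hlen]
    simp only [PySem.List.pyIdx?]
    rw [if_neg (by omega), if_pos (by omega)]
    simp only [neg_neg, Option.some.injEq]
    omega
  have hget : PySem.List.pyGetD (List.replicate (n - k) base ++ List.replicate k (base + 1))
      (-((k : Int) + 1)) 0 = base := by
    simp only [PySem.List.pyGetD, PySem.List.pyGet?, hidx, Option.bind_some]
    rw [List.getElem?_append_left (by simp; omega), List.getElem?_replicate,
      if_pos (by omega)]
    rfl
  rw [hget]
  simp only [PySem.List.pySetD, PySem.List.pySet?, hidx, Option.map_some, Option.getD_some]
  apply List.ext_getElem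
  · simp; omega
  · intro i h1 h2
    simp only [List.getElem_set, List.getElem_append, List.length_replicate,
      List.getElem_replicate]
    split_ifs <;> omega

-- loop invariant for A: after processing range(k), the last k slots are base+1
lemma pv_loop (base : Int) (n : Nat) : ∀ (k : Nat), k ≤ n →
    (PySem.List.pyRange 0 (k : Int) 1).foldl
      (fun splits idx =>
        PySem.List.pySetD splits (-(idx + 1)) (PySem.List.pyGetD splits (-(idx + 1)) 0 + 1))
      (List.replicate n base)
    = List.replicate (n - k) base ++ List.replicate k (base + 1) := by
  intro k
  induction k with
  | zero => simp [PySem.List.pyRange_one_eq_nil]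
  | succ k ih =>
    intro hk
    have hsplit : PySem.List.pyRange 0 ((k : Int) + 1) 1
        = PySem.List.pyRange 0 (k : Int) 1 ++ [(k : Int)] := by
      exact PySem.List.pyRange_one_succ_right (by omega)
    push_cast
    rw [hsplit, List.foldl_append, ih (by omega)]
    simpa using pv_step base n k (by omega)

-- A's value in closed form
lemma pv_A_closed (n k : Int) (hk : 0 < k) :
    compute_task_splits_py n k
      = List.replicate (k - PySem.Int.mod n k).toNat (PySem.Int.floordiv n k)
          ++ List.replicate (PySem.Int.mod n k).toNat (PySem.Int.floordiv n k + 1) := by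
  unfold compute_task_splits_py
  rw [if_neg (not_le.mpr hk)]
  set base := PySem.Int.floordiv n k with hbase
  set r := PySem.Int.mod n k with hr
  have hfm : Int.fmod n k = n % k := by
    rw [Int.fmod_eq_emod]; simp [le_of_lt hk]
  have hr0 : 0 ≤ r := by
    rw [hr]; unfold PySem.Int.mod; rw [hfm]
    exact Int.emod_nonneg n (by omega)
  have hrlt : r < k := by
    rw [hr]; unfold PySem.Int.mod; rw [hfm]
    exact Int.emod_lt_of_pos n hk
  have hcast : r = ((r.toNat : Nat) : Int) := by omega
  simp only
  rw [hcast, pv_loop base k.toNat r.toNat (by omega)]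
  have h1 : k.toNat - r.toNat = (k - r).toNat := by omega
  rw [h1, ← hcast]

-- B's value in the same closed form, by induction following B's loop
lemma pv_fd (n k : Int) (hk : 0 < k) : PySem.Int.floordiv n k = n / k :=
  PySem.Int.floordiv_eq_ediv_of_pos hk

lemma pv_range_down (a : Int) :
    PySem.List.pyRange a 0 (-1) = List.map (fun (j : Nat) => a - (j : Int)) (List.range a.toNat) := by
  simp only [PySem.List.pyRange]
  norm_num
  by_cases h : (0 : Int) < a
  · rw [if_pos h]
    apply List.map_congr_left
    intro j _
    ring
  · rw [if_neg h]
    have h0 : a.toNat = 0 := by omega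
    simp [h0]

lemma pv_range_down_cons (k : Int) (hk : 0 < k) :
    PySem.List.pyRange k 0 (-1) = k :: PySem.List.pyRange (k - 1) 0 (-1) := by
  rw [pv_range_down, pv_range_down]
  have hm : k.toNat = (k - 1).toNat + 1 := by omega
  rw [hm, List.range_succ_eq_map, List.map_cons, List.map_map]
  refine congrArg₂ List.cons (by push_cast; ring) ?_
  apply List.map_congr_left
  intro j _
  simp only [Function.comp_apply]
  push_cast
  ring

lemma pv_B_loop : ∀ (m : Nat) (acc : List Int) (n k : Int), 0 < k → k.toNat = m →
    ((PySem.List.pyRange k 0 (-1)).foldl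
        (fun st tasks_left =>
          let head := PySem.Int.floordiv st.2 tasks_left
          (st.1 ++ [head], st.2 - head))
        (acc, n)).1
      = acc ++ (List.replicate (k - n % k).toNat (n / k)
          ++ List.replicate (n % k).toNat (n / k + 1)) := by
  intro m
  induction m with
  | zero => intro acc n k hk hm; omega
  | succ m ih =>
    intro acc n k hk hm
    rw [pv_range_down_cons k hk, List.foldl_cons]
    simp only [pv_fd n k hk]
    set b := n / k with hb
    set r := n % k with hr
    have hr0 : 0 ≤ r := Int.emod_nonneg n (by omega)
    have hrlt : r < k := Int.emod_lt_of_pos n hk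
    have hsum : k * b + r = n := by rw [hb, hr]; exact Int.mul_ediv_add_emod n k
    have hn' : n - b = r + (k - 1) * b := by linear_combination -hsum
    by_cases h1 : k = 1
    · subst h1
      rw [show (1 : Int) - 1 = 0 from rfl, pv_range_down]
      have hr1 : r = 0 := by omega
      simp [hr1, hb]
    · have hk2 : 2 ≤ k := by omega
      by_cases hcase : r < k - 1
      · -- the head piece leaves quotient b and remainder r for k-1 tasks
        have hdiv : (n - b) / (k - 1) = b := by
          rw [hn', Int.add_mul_ediv_left _ _ (show k - 1 ≠ 0 by omega),
            Int.ediv_eq_zero_of_lt hr0 hcase, zero_add]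
        have hmod : (n - b) % (k - 1) = r := by
          rw [hn', Int.add_mul_emod_self_left, Int.emod_eq_of_lt hr0 hcase]
        rw [ih (acc ++ [b]) (n - b) (k - 1) (by omega) (by omega), hdiv, hmod]
        have h2 : (k - r).toNat = (k - 1 - r).toNat + 1 := by omega
        rw [h2, List.replicate_succ]
        simp
      · -- r = k - 1: the remaining classes divide evenly into k-1 pieces of b+1
        have hreq : r = k - 1 := by omega
        have hn2 : n - b = (1 + b) * (k - 1) := by rw [hn']; rw [hreq]; ring
        have hdiv : (n - b) / (k - 1) = b + 1 := by
          rw [hn2, Int.mul_ediv_cancel _ (show k - 1 ≠ 0 by omega)]; ring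
        have hmod : (n - b) % (k - 1) = 0 := by
          rw [hn2, Int.mul_emod_left]
        rw [ih (acc ++ [b]) (n - b) (k - 1) (by omega) (by omega), hdiv, hmod]
        have h2 : (k - r).toNat = 1 := by omega
        have h3 : (k - 1 - 0).toNat = r.toNat := by omega
        rw [h2, h3, List.replicate_one]
        simp

lemma pv_B_closed (n k : Int) (hk : 0 < k) :
    compute_task_splits_py_alt n k
      = List.replicate (k - PySem.Int.mod n k).toNat (PySem.Int.floordiv n k)
          ++ List.replicate (PySem.Int.mod n k).toNat (PySem.Int.floordiv n k + 1) := by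
  unfold compute_task_splits_py_alt
  rw [if_neg (not_le.mpr hk), pv_fd n k hk]
  have hmd : PySem.Int.mod n k = n % k := by
    unfold PySem.Int.mod
    rw [Int.fmod_eq_emod]; simp [le_of_lt hk]
  rw [hmd]
  simpa using pv_B_loop k.toNat [] n k hk rfl

-- ===== VERDICT (by name: the statement is the Claim_ definition above) =====
theorem compute_task_splits_py_spec : Claim_equal_compute_task_splits_py := by
  intro num_classes n_tasks _ hpre
  unfold Spec_compute_task_splits_py
  rw [pv_A_closed _ _ hpre, pv_B_closed _ _ hpre]
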